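-- pv_equiv track=rewrite | github.com/mp-jakob/aoc2021 | 2021/p10.py | error_score
-- ===== SOURCE A (Python) =====
-- from typing import List, Dict
--
-- bracket_error_score: Dict[str, int] = {")": 3, "]": 57, "}": 1197, ">": 25137}
--
-- bracket_map: Dict[str, str] = {")": "(", "]": "[", "}": "{", ">": "<"}
--
-- def error_score(line: str) -> int:
--     scopes: List[str] = []
--     for char in line:
--         if char not in bracket_map:
--             scopes += [char]
--         elif bracket_map[char] == scopes[-1]:
--             scopes = scopes[:-1]
--         else:
--             return bracket_error_score[char]
--     return 0
-- ===== SOURCE B (Python) =====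
-- bracket_error_score = {")": 3, "]": 57, "}": 1197, ">": 25137}
-- bracket_map = {")": "(", "]": "[", "}": "{", ">": "<"}
--
-- def error_score(line: str) -> int:
--     # Rewrite the line to its normal form by repeatedly deleting adjacent
--     # matched bracket pairs; the first closer surviving the reduction is the
--     # first mismatched closer of the original line.
--     prev = None
--     while line != prev:
--         prev = line
--         for p in ("()", "[]", "{}", "<>"):
--             line = line.replace(p, "")
--     for c in line:
--         if c in bracket_error_score:
--             return bracket_error_score[c]
--     return 0
-- ===== Notes on version B (the rewrite author's own statement) =====
-- stated objective: alternative
-- what changed: B abandons A's left-to-right stack scan (with its O(n) slice-copy pops) and instead rewrites the line to a normal form by repeatedly deleting adjacent matched bracket pairs with str.replace, then returns the score of the first closer that survives the reduction.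
import Mathlib
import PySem

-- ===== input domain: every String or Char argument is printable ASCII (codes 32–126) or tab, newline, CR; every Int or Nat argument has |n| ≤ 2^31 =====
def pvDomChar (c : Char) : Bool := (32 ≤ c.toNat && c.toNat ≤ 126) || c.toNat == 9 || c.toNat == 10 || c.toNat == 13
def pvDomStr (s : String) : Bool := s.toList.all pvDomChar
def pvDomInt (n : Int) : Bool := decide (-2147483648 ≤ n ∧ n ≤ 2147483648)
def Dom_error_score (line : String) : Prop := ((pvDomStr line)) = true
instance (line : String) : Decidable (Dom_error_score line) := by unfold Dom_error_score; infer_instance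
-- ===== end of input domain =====

-- B replaces A's left-to-right stack scan by string rewriting: it deletes adjacent matched
-- bracket pairs until a normal form is reached and scores the first surviving closer
-- (alternative algorithm; return value equivalence only).

-- shared module-level constants (bracket_map / bracket_error_score)
def pvIsClose (c : Char) : Bool := c = ')' || c = ']' || c = '}' || c = '>'
def pvOpenOf (c : Char) : Char :=
  if c = ')' then '(' else if c = ']' then '[' else if c = '}' then '{' else '<'
def pvScore (c : Char) : Int :=
  if c = ')' then 3 else if c = ']' then 57 else if c = '}' then 1197 else 25137

-- ===== PORT A =====
-- A keeps the stack in a list, pushing with `scopes += [char]` and popping via the slice copy `scopes[:-1]`;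
-- `scopes[-1]` on an empty list is an IndexError (none from pyGet?), excluded by Pre_ (port returns 0 there).
def errGoA : List Char → List Char → Int
  | _, [] => 0
  | scopes, c :: rest' =>
    if pvIsClose c = false then
      errGoA (scopes ++ [c]) rest'
    else
      match PySem.List.pyGet? scopes (-1) with
      | none => 0  -- IndexError; outside Pre_
      | some t =>
        if pvOpenOf c = t then errGoA (PySem.List.slice scopes none (some (-1))) rest'
        else pvScore c

def error_score (line : String) : Int := errGoA [] line.toList

-- ===== PORT B =====
-- B's inner `for p in ("()","[]","{}","<>"): line = line.replace(p, "")` pass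
def pvReplacePairs (s : List Char) : List Char :=
  [['(', ')'], ['[', ']'], ['{', '}'], ['<', '>']].foldl
    (fun t p => PySem.Chars.replace t p []) s

-- termination support for B's `while line != prev` loop: one pass either fixes the string or shortens it
theorem pvPrefix2 (x y c : Char) (t : List Char) (h : [x, y].isPrefixOf (c :: t) = true) :
    ∃ r, c = x ∧ t = y :: r := by
  match t with
  | [] => simp [List.isPrefixOf] at h
  | d :: r =>
    simp [List.isPrefixOf] at h
    exact ⟨r, h.1.symm, by rw [← h.2]⟩

theorem pvGoShrink (x y : Char) : ∀ (fuel : Nat) (l acc : List Char), l.length ≤ fuel →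
    PySem.Chars.replace.go [x, y] [] fuel l acc = acc.reverse ++ l ∨
      (PySem.Chars.replace.go [x, y] [] fuel l acc).length < acc.length + l.length := by
  intro fuel
  induction fuel with
  | zero =>
    intro l acc hl
    have : l = [] := List.length_eq_zero_iff.mp (Nat.le_zero.mp hl)
    subst this; left; simp [PySem.Chars.replace.go]
  | succ f ih =>
    intro l acc hl
    match l with
    | [] => left; simp [PySem.Chars.replace.go]
    | c :: t =>
      rw [PySem.Chars.replace.go]
      by_cases hp : [x, y].isPrefixOf (c :: t) = true
      · rw [if_pos hp]
        obtain ⟨r, hcx, htr⟩ := pvPrefix2 x y c t hp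
        subst htr
        have hr : r.length ≤ f := by simp at hl; omega
        rcases ih (List.drop ([x, y].length) (c :: y :: r)) ([].reverse ++ acc)
            (by simpa using hr) with h | h
        · right; rw [h]; simp
        · right; refine lt_trans h ?_; simp
      · rw [if_neg hp]
        have ht : t.length ≤ f := by simp at hl; omega
        rcases ih t (c :: acc) ht with h | h
        · left; rw [h]; simp
        · right; refine lt_of_lt_of_le h ?_; simp; omega

theorem pvReplaceShrink (x y : Char) (s : List Char) :
    PySem.Chars.replace s [x, y] [] = s ∨ (PySem.Chars.replace s [x, y] []).length < s.length := by
  unfold PySem.Chars.replace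
  simp only [List.isEmpty, Bool.false_eq_true, if_false]
  simpa using pvGoShrink x y s.length s [] le_rfl

theorem pvReplaceLen (x y : Char) (s : List Char) :
    (PySem.Chars.replace s [x, y] []).length ≤ s.length := by
  rcases pvReplaceShrink x y s with h | h
  · rw [h]
  · exact le_of_lt h

theorem pvReplacePairsShrink (s : List Char) :
    pvReplacePairs s = s ∨ (pvReplacePairs s).length < s.length := by
  unfold pvReplacePairs
  simp only [List.foldl]
  rcases pvReplaceShrink '(' ')' s with h1 | h1
  · rw [h1]
    rcases pvReplaceShrink '[' ']' s with h2 | h2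
    · rw [h2]
      rcases pvReplaceShrink '{' '}' s with h3 | h3
      · rw [h3]
        exact pvReplaceShrink '<' '>' s
      · right
        exact lt_of_le_of_lt (pvReplaceLen _ _ _) h3
    · right
      exact lt_of_le_of_lt (le_trans (pvReplaceLen _ _ _) (pvReplaceLen _ _ _)) h2
  · right
    exact lt_of_le_of_lt
      (le_trans (pvReplaceLen _ _ _) (le_trans (pvReplaceLen _ _ _) (pvReplaceLen _ _ _))) h1

-- B's `while line != prev` loop, iterating the pass to a fixpoint
def pvReduce (s : List Char) : List Char :=
  let t := pvReplacePairs s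
  if _h : t = s then s else pvReduce t
termination_by s.length
decreasing_by
  rcases pvReplacePairsShrink s with he | hl
  · exact absurd he _h
  · exact hl

-- B's final `for c in line: if c in bracket_error_score: return …`
def pvFirstCloserScore : List Char → Int
  | [] => 0
  | c :: r => if pvIsClose c then pvScore c else pvFirstCloserScore r

def error_score_alt (line : String) : Int := pvFirstCloserScore (pvReduce line.toList)

-- ===== PRECONDITION & SPEC =====
def pvIsOpen (c : Char) : Bool := c = '(' || c = '[' || c = '{' || c = '<'

-- standard balanced-bracket check (Dyck words over the four bracket pairs; any other char is unbalanced)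
def pvBalGo : List Char → List Char → Bool
  | st, [] => st.isEmpty
  | st, c :: r =>
    if pvIsOpen c then pvBalGo (c :: st) r
    else if pvIsClose c then
      match st with
      | t :: st' => t = pvOpenOf c && pvBalGo st' r
      | [] => false
    else false

-- Pre_ excludes exactly the lines on which A raises IndexError at `scopes[-1]`: those containing a
-- closing bracket preceded by a balanced bracket prefix (the scan reaches that bracket with an empty
-- stack); B returns that bracket's error score there.
def Pre_error_score (line : String) : Prop :=
  ∀ i : Nat, i < line.toList.length → pvIsClose (line.toList.getD i ' ') = true →
    pvBalGo [] (line.toList.take i) = false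
instance (line : String) : Decidable (Pre_error_score line) := by unfold Pre_error_score; infer_instance
def pvWitness_error_score : String := "<([a])>}"

def Spec_error_score (line : String) (out : Int) : Prop := out = error_score_alt line
instance (line : String) (out : Int) : Decidable (Spec_error_score line out) := by unfold Spec_error_score; infer_instance

-- ===== CLAIM (what is proved, stated in full; the proofs are below) =====
def Claim_equal_error_score : Prop := ∀ (line : String), Dom_error_score line → Pre_error_score line → Spec_error_score line (error_score line)

-- ===== LEMMAS AND PROOFS =====
-- The proof goes through an O(1)-pop head-stack machine errGoB:
-- (1) A's port equals errGoB wherever A does not raise (errRaisesA = false, implied by Pre_);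
-- (2) errGoB is invariant under deleting one kind of adjacent matched pair (pvCancel), which is
--     exactly what each str.replace pass of B performs, hence invariant under pvReduce;
-- (3) on a reduction normal form the machine never pops, so it returns the first closer's score.
def errGoB : List Char → List Char → Int
  | _, [] => 0
  | stack, c :: rest' =>
    if pvIsClose c then
      match stack with
      | t :: stack' => if t = pvOpenOf c then errGoB stack' rest' else pvScore c
      | [] => pvScore c
    else
      errGoB (c :: stack) rest'

theorem errGoB_nil (st : List Char) : errGoB st [] = 0 := by cases st <;> rfl
theorem errGoB_close_nil (c : Char) (r : List Char) (hc : pvIsClose c = true) :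
    errGoB [] (c :: r) = pvScore c := by simp [errGoB, hc]
theorem errGoB_close_match (t : Char) (st' : List Char) (c : Char) (r : List Char)
    (hc : pvIsClose c = true) (ht : t = pvOpenOf c) :
    errGoB (t :: st') (c :: r) = errGoB st' r := by simp [errGoB, hc, ht]
theorem errGoB_close_mis (t : Char) (st' : List Char) (c : Char) (r : List Char)
    (hc : pvIsClose c = true) (ht : ¬ t = pvOpenOf c) :
    errGoB (t :: st') (c :: r) = pvScore c := by simp [errGoB, hc, ht]
theorem errGoB_open (st : List Char) (c : Char) (r : List Char) (hc : pvIsClose c = false) :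
    errGoB st (c :: r) = errGoB (c :: st) r := by cases st <;> simp [errGoB, hc]

-- errRaisesA mirrors A's scan and reports whether it hits `scopes[-1]` on an empty stack (IndexError).
def errRaisesA : List Char → List Char → Bool
  | _, [] => false
  | scopes, c :: rest' =>
    if pvIsClose c = false then
      errRaisesA (scopes ++ [c]) rest'
    else
      match scopes.getLast? with
      | none => true
      | some t => if pvOpenOf c = t then errRaisesA scopes.dropLast rest' else false

theorem errGo_agree : ∀ (rest st : List Char), errRaisesA st.reverse rest = false →
    errGoA st.reverse rest = errGoB st rest := by
  intro rest
  induction rest with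
  | nil => intro st _; simp [errGoA, errGoB]
  | cons c rest' ih =>
    intro st h
    simp only [errRaisesA] at h
    by_cases hc : pvIsClose c
    · cases st with
      | nil => simp [hc] at h
      | cons t st' =>
        have hlast : ((t :: st').reverse).getLast? = some t := by simp
        have hget : PySem.List.pyGet? (t :: st').reverse (-1) = some t := by
          rw [PySem.List.pyGet?_neg_one, hlast]
        have hdrop : (t :: st').reverse.dropLast = st'.reverse := by
          simp
        simp only [hc, hlast, Bool.true_eq_false, if_false] at h
        by_cases he : pvOpenOf c = t
        · have h' : errRaisesA st'.reverse rest' = false := by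
            simpa [he, hdrop] using h
          simp only [errGoA, errGoB, hc, hget, PySem.List.slice_to_neg_one, hdrop]
          simp [he, ih st' h']
        · simp only [errGoA, errGoB, hc, hget, Bool.true_eq_false, if_false, if_true]
          rw [if_neg he, if_neg (fun hh => he hh.symm)]
    · have h' : errRaisesA ((c :: st).reverse) rest' = false := by
        simpa [hc] using h
      simp only [errGoA, errGoB, hc]
      simpa using ih (c :: st) h'

theorem pvBalGo_stack_open : ∀ (l st : List Char), pvBalGo st l = true → ∀ x ∈ st, pvIsOpen x = true := by
  intro l
  induction l with
  | nil => intro st h x hx; cases st <;> simp_all [pvBalGo]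
  | cons c r ih =>
    intro st h x hx
    simp only [pvBalGo] at h
    by_cases ho : pvIsOpen c
    · simp only [ho, if_true] at h
      exact ih (c :: st) h x (List.mem_cons_of_mem c hx)
    · simp only [ho, Bool.false_eq_true, if_false] at h
      by_cases hc : pvIsClose c
      · simp only [hc, if_true] at h
        cases st with
        | nil => cases hx
        | cons t st' =>
          have hand := Bool.and_eq_true_iff.mp h
          rcases List.mem_cons.mp hx with rfl | hx'
          · have hx0 : x = pvOpenOf c := by simpa using hand.1
            have h4 : pvOpenOf c = '(' ∨ pvOpenOf c = '[' ∨ pvOpenOf c = '{' ∨ pvOpenOf c = '<' := by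
              unfold pvOpenOf; split_ifs <;> simp
            rcases h4 with h4 | h4 | h4 | h4 <;> simp [pvIsOpen, hx0, h4]
          · exact ih st' hand.2 x hx'
      · simp [hc] at h

theorem close_not_open (c : Char) (hc : pvIsClose c = true) : pvIsOpen c = false := by
  unfold pvIsClose at hc
  rcases (by simpa [or_assoc] using hc : c = ')' ∨ c = ']' ∨ c = '}' ∨ c = '>') with h1 | h1 | h1 | h1 <;>
    simp [pvIsOpen, h1]

theorem errRaisesA_balanced : ∀ (rest st : List Char), errRaisesA st.reverse rest = true →
    ∃ i, i < rest.length ∧ pvIsClose (rest.getD i ' ') = true ∧ pvBalGo st (rest.take i) = true := by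
  intro rest
  induction rest with
  | nil => intro st h; simp [errRaisesA] at h
  | cons c rest' ih =>
    intro st h
    rw [errRaisesA] at h
    by_cases hc : pvIsClose c
    · cases st with
      | nil =>
        exact ⟨0, by simp, by simpa using hc, by simp [pvBalGo]⟩
      | cons t st' =>
        have hlast : ((t :: st').reverse).getLast? = some t := by simp
        simp only [hc, hlast, Bool.true_eq_false, if_false] at h
        by_cases he : pvOpenOf c = t
        · have hdrop : (t :: st').reverse.dropLast = st'.reverse := by simp
          rw [if_pos he, hdrop] at h
          obtain ⟨i, hi, hcl, hb⟩ := ih st' h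
          refine ⟨i + 1, by simpa using hi, by simpa using hcl, ?_⟩
          simp only [List.take_succ_cons, pvBalGo, close_not_open c hc, Bool.false_eq_true,
            if_false, hc, if_true]
          simp [he, hb]
        · simp [he] at h
    · rw [if_pos (by simpa using hc)] at h
      have h' : errRaisesA ((c :: st).reverse) rest' = true := by simpa using h
      obtain ⟨i, hi, hcl, hb⟩ := ih (c :: st) h'
      by_cases ho : pvIsOpen c
      · exact ⟨i + 1, by simpa using hi, by simpa using hcl,
          by simp only [List.take_succ_cons, pvBalGo, ho, if_true]; exact hb⟩
      · exact absurd (pvBalGo_stack_open _ _ hb c (List.mem_cons_self)) (by simp [ho])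

-- ---- reduction side ----
-- one str.replace(p, "") pass as a recursion (non-overlapping, left to right)
def pvCancel (x y : Char) : List Char → List Char
  | [] => []
  | [c] => [c]
  | c :: d :: r => if c = x ∧ d = y then pvCancel x y r else c :: pvCancel x y (d :: r)
termination_by l => l.length

theorem pvGo_eq_cancel (x y : Char) : ∀ (fuel : Nat) (l acc : List Char), l.length ≤ fuel →
    PySem.Chars.replace.go [x, y] [] fuel l acc = acc.reverse ++ pvCancel x y l := by
  intro fuel
  induction fuel with
  | zero =>
    intro l acc hl
    have : l = [] := List.length_eq_zero_iff.mp (Nat.le_zero.mp hl)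
    subst this; simp [PySem.Chars.replace.go, pvCancel]
  | succ f ih =>
    intro l acc hl
    match l with
    | [] => simp [PySem.Chars.replace.go, pvCancel]
    | c :: t =>
      rw [PySem.Chars.replace.go]
      by_cases hp : [x, y].isPrefixOf (c :: t) = true
      · rw [if_pos hp]
        obtain ⟨r, hcx, htr⟩ := pvPrefix2 x y c t hp
        subst htr
        have hr : r.length ≤ f := by simp at hl; omega
        rw [show List.drop ([x, y].length) (c :: y :: r) = r from rfl]
        rw [ih r ([].reverse ++ acc) hr]
        subst hcx
        simp [pvCancel]
      · rw [if_neg hp]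
        have ht : t.length ≤ f := by simp at hl; omega
        rw [ih t (c :: acc) ht]
        have hnc : pvCancel x y (c :: t) = c :: pvCancel x y t := by
          match t with
          | [] => simp [pvCancel]
          | d :: r =>
            have : ¬(c = x ∧ d = y) := by
              rintro ⟨rfl, rfl⟩; simp [List.isPrefixOf] at hp
            simp [pvCancel, this]
        rw [hnc]; simp

theorem pvReplace_eq_cancel (x y : Char) (s : List Char) :
    PySem.Chars.replace s [x, y] [] = pvCancel x y s := by
  unfold PySem.Chars.replace
  simp only [List.isEmpty, Bool.false_eq_true, if_false]
  simpa using pvGo_eq_cancel x y s.length s [] le_rfl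

theorem pvCancel_len (x y : Char) : ∀ (l : List Char), (pvCancel x y l).length ≤ l.length := by
  intro l
  induction hn : l.length using Nat.strong_induction_on generalizing l with
  | _ n ih =>
    match l, hn with
    | [], rfl => simp [pvCancel]
    | [c], rfl => simp [pvCancel]
    | c :: d :: r, rfl =>
      rw [pvCancel]
      split_ifs with h
      · have := ih r.length (by simp) r rfl; simp; omega
      · have := ih (d :: r).length (by simp) (d :: r) rfl; simp at this ⊢; omega

theorem pvCancel_eq_of_len (x y : Char) : ∀ (l : List Char),
    (pvCancel x y l).length = l.length → pvCancel x y l = l := by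
  intro l
  induction hn : l.length using Nat.strong_induction_on generalizing l with
  | _ n ih =>
    match l, hn with
    | [], rfl => intro _; simp [pvCancel]
    | [c], rfl => intro _; simp [pvCancel]
    | c :: d :: r, rfl =>
      rw [pvCancel]
      split_ifs with h
      · intro hlen
        have := pvCancel_len x y r
        simp at hlen; omega
      · intro hlen
        have htl : pvCancel x y (d :: r) = d :: r := by
          refine ih (d :: r).length (by simp) (d :: r) rfl ?_
          simpa using hlen
        rw [htl]

-- "no adjacent pair x,y" predicate; a pvCancel fixpoint has none
def pvNoAdj (x y : Char) : List Char → Bool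
  | [] => true
  | [_] => true
  | c :: d :: r => !(c = x && d = y) && pvNoAdj x y (d :: r)
termination_by l => l.length

theorem pvCancel_fix_noAdj (x y : Char) : ∀ (l : List Char),
    pvCancel x y l = l → pvNoAdj x y l = true := by
  intro l
  induction hn : l.length using Nat.strong_induction_on generalizing l with
  | _ n ih =>
    match l, hn with
    | [], rfl => intro _; simp [pvNoAdj]
    | [c], rfl => intro _; simp [pvNoAdj]
    | c :: d :: r, rfl =>
      intro hfix
      rw [pvCancel] at hfix
      split_ifs at hfix with h
      · exfalso
        have := pvCancel_len x y r
        have : (pvCancel x y r).length = (c :: d :: r).length := by rw [hfix]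
        simp at this; omega
      · have htl : pvCancel x y (d :: r) = d :: r := by
          injection hfix
        rw [pvNoAdj]
        simp only [Bool.and_eq_true, Bool.not_eq_true']
        exact ⟨by simpa using h, ih (d :: r).length (by simp) (d :: r) rfl htl⟩

-- irreducibility for all four pairs at once
def pvIrr : List Char → Bool
  | [] => true
  | [_] => true
  | c :: d :: r => !(pvIsClose d && (pvOpenOf d == c)) && pvIrr (d :: r)
termination_by l => l.length

theorem pvIrr_of_noAdj : ∀ (l : List Char),
    pvNoAdj '(' ')' l = true → pvNoAdj '[' ']' l = true → pvNoAdj '{' '}' l = true →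
    pvNoAdj '<' '>' l = true → pvIrr l = true := by
  intro l
  induction hn : l.length using Nat.strong_induction_on generalizing l with
  | _ n ih =>
    match l, hn with
    | [], rfl => intro _ _ _ _; simp [pvIrr]
    | [c], rfl => intro _ _ _ _; simp [pvIrr]
    | c :: d :: r, rfl =>
      intro h1 h2 h3 h4
      rw [pvNoAdj] at h1 h2 h3 h4
      simp only [Bool.and_eq_true, Bool.not_eq_true'] at h1 h2 h3 h4
      rw [pvIrr]
      simp only [Bool.and_eq_true, Bool.not_eq_true']
      refine ⟨?_, ih (d :: r).length (by simp) (d :: r) rfl h1.2 h2.2 h3.2 h4.2⟩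
      by_cases hd : pvIsClose d = true
      · rcases (by simpa [pvIsClose, or_assoc] using hd :
            d = ')' ∨ d = ']' ∨ d = '}' ∨ d = '>') with rfl | rfl | rfl | rfl
        · have hne : ¬(c = '(') := by
            have := h1.1; intro hcc; subst hcc; simp at this
          show (pvIsClose ')' && (pvOpenOf ')' == c)) = false
          simp only [show pvIsClose ')' = true from rfl, show pvOpenOf ')' = '(' from rfl,
            Bool.true_and, beq_eq_false_iff_ne]
          exact fun h => hne h.symm
        · have hne : ¬(c = '[') := by
            have := h2.1; intro hcc; subst hcc; simp at this
          show (pvIsClose ']' && (pvOpenOf ']' == c)) = false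
          simp only [show pvIsClose ']' = true from rfl, show pvOpenOf ']' = '[' from rfl,
            Bool.true_and, beq_eq_false_iff_ne]
          exact fun h => hne h.symm
        · have hne : ¬(c = '{') := by
            have := h3.1; intro hcc; subst hcc; simp at this
          show (pvIsClose '}' && (pvOpenOf '}' == c)) = false
          simp only [show pvIsClose '}' = true from rfl, show pvOpenOf '}' = '{' from rfl,
            Bool.true_and, beq_eq_false_iff_ne]
          exact fun h => hne h.symm
        · have hne : ¬(c = '<') := by
            have := h4.1; intro hcc; subst hcc; simp at this
          show (pvIsClose '>' && (pvOpenOf '>' == c)) = false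
          simp only [show pvIsClose '>' = true from rfl, show pvOpenOf '>' = '<' from rfl,
            Bool.true_and, beq_eq_false_iff_ne]
          exact fun h => hne h.symm
      · simp only [Bool.not_eq_true] at hd
        simp [hd]

-- (2) machine invariance under one cancellation pass
theorem errGoB_cancel (x y : Char) (hy : pvIsClose y = true) (hx : pvOpenOf y = x) :
    ∀ (l st : List Char), errGoB st (pvCancel x y l) = errGoB st l := by
  have hxo : pvIsClose x = false := by
    rw [← hx]
    rcases (by simpa [pvIsClose, or_assoc] using hy :
        y = ')' ∨ y = ']' ∨ y = '}' ∨ y = '>') with rfl | rfl | rfl | rfl <;> rfl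
  intro l
  induction hn : l.length using Nat.strong_induction_on generalizing l with
  | _ n ih =>
    match l, hn with
    | [], rfl => intro st; simp [pvCancel]
    | [c], rfl => intro st; simp [pvCancel]
    | c :: d :: r, rfl =>
      intro st
      rw [pvCancel]
      split_ifs with h
      · obtain ⟨rfl, rfl⟩ := h
        rw [ih r.length (by simp) r rfl st]
        rw [errGoB_open st c (d :: r) hxo, errGoB_close_match c st d r hy hx.symm]
      · have ihtl := ih (d :: r).length (by simp) (d :: r) rfl
        by_cases hc : pvIsClose c
        · match st with
          | [] => rw [errGoB_close_nil c _ hc, errGoB_close_nil c _ hc]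
          | t :: st' =>
            by_cases ht : t = pvOpenOf c
            · rw [errGoB_close_match t st' c _ hc ht, errGoB_close_match t st' c _ hc ht, ihtl st']
            · rw [errGoB_close_mis t st' c _ hc ht, errGoB_close_mis t st' c _ hc ht]
        · rw [errGoB_open st c _ (by simpa using hc), errGoB_open st c _ (by simpa using hc),
            ihtl (c :: st)]

-- one full replace pass preserves the machine's answer
theorem errGoB_pass (s : List Char) (st : List Char) :
    errGoB st (pvReplacePairs s) = errGoB st s := by
  unfold pvReplacePairs
  simp only [List.foldl]
  rw [pvReplace_eq_cancel, pvReplace_eq_cancel, pvReplace_eq_cancel, pvReplace_eq_cancel]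
  rw [errGoB_cancel '<' '>' (by rfl) (by rfl)]
  rw [errGoB_cancel '{' '}' (by rfl) (by rfl)]
  rw [errGoB_cancel '[' ']' (by rfl) (by rfl)]
  rw [errGoB_cancel '(' ')' (by rfl) (by rfl)]

theorem errGoB_reduce (s : List Char) (st : List Char) :
    errGoB st (pvReduce s) = errGoB st s := by
  induction hn : s.length using Nat.strong_induction_on generalizing s with
  | _ n ih =>
    rw [pvReduce]
    split_ifs with h
    · rfl
    · subst hn
      rcases pvReplacePairsShrink s with he | hl
      · exact absurd he h
      · rw [ih (pvReplacePairs s).length hl (pvReplacePairs s) rfl]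
        exact errGoB_pass s st

theorem pvReduce_fix (s : List Char) : pvReplacePairs (pvReduce s) = pvReduce s := by
  induction hn : s.length using Nat.strong_induction_on generalizing s with
  | _ n ih =>
    rw [pvReduce]
    split_ifs with h
    · exact h
    · subst hn
      rcases pvReplacePairsShrink s with he | hl
      · exact absurd he h
      · exact ih (pvReplacePairs s).length hl (pvReplacePairs s) rfl

-- a pvReplacePairs fixpoint is irreducible for every pair
theorem pvIrr_of_fix (t : List Char) (h : pvReplacePairs t = t) : pvIrr t = true := by
  have hch : pvCancel '<' '>' (pvCancel '{' '}' (pvCancel '[' ']' (pvCancel '(' ')' t))) = t := by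
    conv_rhs => rw [← h]
    unfold pvReplacePairs
    simp only [List.foldl]
    rw [pvReplace_eq_cancel, pvReplace_eq_cancel, pvReplace_eq_cancel, pvReplace_eq_cancel]
  have e1 : pvCancel '(' ')' t = t := by
    apply pvCancel_eq_of_len
    have l1 := pvCancel_len '(' ')' t
    have l2 := pvCancel_len '[' ']' (pvCancel '(' ')' t)
    have l3 := pvCancel_len '{' '}' (pvCancel '[' ']' (pvCancel '(' ')' t))
    have l4 := pvCancel_len '<' '>' (pvCancel '{' '}' (pvCancel '[' ']' (pvCancel '(' ')' t)))
    have h0 : (pvCancel '<' '>' (pvCancel '{' '}' (pvCancel '[' ']' (pvCancel '(' ')' t)))).length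
        = t.length := by rw [hch]
    omega
  rw [e1] at hch
  have e2 : pvCancel '[' ']' t = t := by
    apply pvCancel_eq_of_len
    have l2 := pvCancel_len '[' ']' t
    have l3 := pvCancel_len '{' '}' (pvCancel '[' ']' t)
    have l4 := pvCancel_len '<' '>' (pvCancel '{' '}' (pvCancel '[' ']' t))
    have h0 : (pvCancel '<' '>' (pvCancel '{' '}' (pvCancel '[' ']' t))).length = t.length := by
      rw [hch]
    omega
  rw [e2] at hch
  have e3 : pvCancel '{' '}' t = t := by
    apply pvCancel_eq_of_len
    have l3 := pvCancel_len '{' '}' t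
    have l4 := pvCancel_len '<' '>' (pvCancel '{' '}' t)
    have h0 : (pvCancel '<' '>' (pvCancel '{' '}' t)).length = t.length := by rw [hch]
    omega
  rw [e3] at hch
  exact pvIrr_of_noAdj t (pvCancel_fix_noAdj _ _ t e1) (pvCancel_fix_noAdj _ _ t e2)
    (pvCancel_fix_noAdj _ _ t e3) (pvCancel_fix_noAdj _ _ t hch)

-- (3) on an irreducible string the machine returns the first closer's score
theorem errGoB_irr : ∀ (l st : List Char), pvIrr l = true →
    (∀ c h, l.head? = some c → pvIsClose c = true → st.head? = some h → pvOpenOf c ≠ h) →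
    errGoB st l = pvFirstCloserScore l := by
  intro l
  induction l with
  | nil => intro st _ _; simp [errGoB_nil, pvFirstCloserScore]
  | cons c r ihl =>
    intro st hirr hst
    by_cases hc : pvIsClose c
    · rw [show pvFirstCloserScore (c :: r) = pvScore c by simp [pvFirstCloserScore, hc]]
      match st with
      | [] => exact errGoB_close_nil c r hc
      | t :: st' =>
        have hne : pvOpenOf c ≠ t := hst c t rfl hc rfl
        exact errGoB_close_mis t st' c r hc (fun h => hne h.symm)
    · rw [show pvFirstCloserScore (c :: r) = pvFirstCloserScore r by
        simp [pvFirstCloserScore, hc]]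
      rw [errGoB_open st c r (by simpa using hc)]
      have hirr' : pvIrr r = true := by
        match r with
        | [] => simp [pvIrr]
        | d :: r' => rw [pvIrr] at hirr; exact (Bool.and_eq_true_iff.mp hirr).2
      refine ihl (c :: st) hirr' ?_
      intro d h hd hdc hh
      simp only [List.head?] at hh
      injection hh with hh; subst hh
      match r, hd with
      | d :: r', rfl =>
        rw [pvIrr] at hirr
        have h1 := (Bool.and_eq_true_iff.mp hirr).1
        simp only [Bool.not_eq_true', Bool.and_eq_false_iff] at h1
        rcases h1 with h1 | h1
        · rw [hdc] at h1; cases h1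
        · intro heq; rw [heq] at h1; simp at h1

theorem alt_eq_machine (l : List Char) : pvFirstCloserScore (pvReduce l) = errGoB [] l := by
  rw [← errGoB_reduce l []]
  exact (errGoB_irr (pvReduce l) [] (pvIrr_of_fix _ (pvReduce_fix l))
    (fun c h _ _ hh => by cases hh)).symm

-- ===== VERDICT (by name: the statement is the Claim_ definition above) =====
theorem error_score_spec : Claim_equal_error_score := by
  intro line _ hpre
  unfold Pre_error_score at hpre
  have hok : errRaisesA ([] : List Char).reverse line.toList = false := by
    by_contra hr
    have hr' : errRaisesA ([] : List Char).reverse line.toList = true := by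
      simpa using hr
    obtain ⟨i, hi, hcl, hb⟩ := errRaisesA_balanced line.toList [] hr'
    have := hpre i hi hcl
    rw [this] at hb
    cases hb
  unfold Spec_error_score error_score error_score_alt
  rw [alt_eq_machine]
  simpa using errGo_agree line.toList [] hok
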